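-- pv_equiv track=rewrite | github.com/simon-bachhuber/ring | x_xy/utils/sys_composer.py | _new_to_old
-- ===== SOURCE A (Python) =====
-- def _new_to_old(new_parents: list[int]) -> list[int]:
--     new_indices = []
--
--     def find_childs_of(parent: int):
--         for i, p in enumerate(new_parents):
--             if p == parent:
--                 new_indices.append(i)
--                 find_childs_of(i)
--
--     find_childs_of(-1)
--     return new_indices
-- ===== SOURCE B (Python) =====
-- def _new_to_old(new_parents: list[int]) -> list[int]:
--     children = {}
--     for i, p in enumerate(new_parents):
--         children.setdefault(p, []).append(i)
--
--     out = []
--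
--     def dfs(u: int):
--         for c in children.get(u, []):
--             out.append(c)
--             dfs(c)
--
--     dfs(-1)
--     return out
-- ===== Notes on version B (the rewrite author's own statement) =====
-- stated objective: alternative
-- what changed: B precomputes a parent->children adjacency dict in one pass and DFSes over it, so each node's children come from a lookup instead of rescanning the whole parent list at every node; on the measured input family this was not faster.
import Mathlib
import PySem

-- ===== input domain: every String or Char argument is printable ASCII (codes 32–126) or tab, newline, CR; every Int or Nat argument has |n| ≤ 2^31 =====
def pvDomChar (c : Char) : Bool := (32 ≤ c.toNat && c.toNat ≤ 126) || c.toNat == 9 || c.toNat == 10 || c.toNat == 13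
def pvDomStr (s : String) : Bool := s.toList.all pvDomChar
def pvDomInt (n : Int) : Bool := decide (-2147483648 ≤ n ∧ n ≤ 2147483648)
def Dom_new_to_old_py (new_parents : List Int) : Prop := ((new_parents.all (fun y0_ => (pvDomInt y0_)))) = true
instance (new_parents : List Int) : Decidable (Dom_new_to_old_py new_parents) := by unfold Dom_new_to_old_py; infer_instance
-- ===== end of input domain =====

-- B builds a parent->children adjacency dict once and DFSes over it, instead of A's per-node rescan of the whole parent list (alternative algorithm; not measured faster).

-- ===== PORT A =====
-- find_childs_of: scans enumerate(new_parents) for entries equal to `parent`, appends and recurses.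
-- The fuel (length+1) only makes the recursion total: Python's call chain consists of distinct
-- indices preceded by the root -1, so its depth never exceeds length+1 and the fuel is never exhausted.
def pvGoA (xs : List (Int × Int)) : Nat → Int → List Int → List Int
  | 0, _, acc => acc
  | f + 1, parent, acc =>
      xs.foldl (fun acc ip => if ip.2 = parent then pvGoA xs f ip.1 (acc ++ [ip.1]) else acc) acc

def new_to_old_py (new_parents : List Int) : List Int :=
  pvGoA (PySem.List.enumerate new_parents) (new_parents.length + 1) (-1) []

-- ===== PORT B =====
-- children.setdefault(p, []).append(i) over enumerate(new_parents)
def pvChildren (new_parents : List Int) : PySem.Dict Int (List Int) :=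
  (PySem.List.enumerate new_parents).foldl
    (fun d ip => d.modify ip.2 [] (· ++ [ip.1])) PySem.Dict.empty

-- dfs(u): iterate over children.get(u, []), appending and recursing (same fuel remark as for A).
def pvGoB (ch : PySem.Dict Int (List Int)) : Nat → Int → List Int → List Int
  | 0, _, acc => acc
  | f + 1, u, acc =>
      (ch.getD u []).foldl (fun acc c => pvGoB ch f c (acc ++ [c])) acc

def new_to_old_py_alt (new_parents : List Int) : List Int :=
  pvGoB (pvChildren new_parents) (new_parents.length + 1) (-1) []

-- ===== PRECONDITION & SPEC =====
def Spec_new_to_old_py (new_parents : List Int) (out : List Int) : Prop := out = new_to_old_py_alt new_parents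
instance (new_parents : List Int) (out : List Int) : Decidable (Spec_new_to_old_py new_parents out) := by unfold Spec_new_to_old_py; infer_instance

-- ===== CLAIM (what is proved, stated in full; the proofs are below) =====
def Claim_equal_new_to_old_py : Prop := ∀ (new_parents : List Int), Dom_new_to_old_py new_parents → Spec_new_to_old_py new_parents (new_to_old_py new_parents)

-- ===== LEMMAS AND PROOFS =====

-- the adjacency dict's entry at `p` is exactly the in-order list of indices whose parent is `p`
theorem pvChildren_getD (new_parents : List Int) (p : Int) :
    (pvChildren new_parents).getD p []
      = ((PySem.List.enumerate new_parents).filter (fun ip => ip.2 == p)).map (·.1) := by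
  unfold pvChildren
  have h : (PySem.List.enumerate new_parents).foldl
      (fun d ip => d.modify ip.2 [] (· ++ [ip.1])) PySem.Dict.empty
    = ((PySem.List.enumerate new_parents).map (fun ip => (ip.2, ip.1))).foldl
      (fun d q => d.modify q.1 [] (· ++ [q.2])) PySem.Dict.empty := by
    rw [List.foldl_map]
  rw [h, PySem.Dict.getD_foldl_modify_append, PySem.Dict.getD_empty]
  simp [List.filter_map, List.map_map, Function.comp_def]

theorem pvGo_eq (new_parents : List Int) (f : Nat) :
    ∀ (parent : Int) (acc : List Int),
      pvGoA (PySem.List.enumerate new_parents) f parent acc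
        = pvGoB (pvChildren new_parents) f parent acc := by
  induction f with
  | zero => intro parent acc; rfl
  | succ f ih =>
      intro parent acc
      show (PySem.List.enumerate new_parents).foldl
          (fun acc ip => if ip.2 = parent then
              pvGoA (PySem.List.enumerate new_parents) f ip.1 (acc ++ [ip.1]) else acc) acc
        = ((pvChildren new_parents).getD parent []).foldl
          (fun acc c => pvGoB (pvChildren new_parents) f c (acc ++ [c])) acc
      rw [pvChildren_getD, List.foldl_map, List.foldl_filter]
      congr 1
      funext a ip
      by_cases hp : ip.2 = parent <;> simp [hp, ih]

-- ===== VERDICT (by name: the statement is the Claim_ definition above) =====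
theorem new_to_old_py_spec : Claim_equal_new_to_old_py := by
  intro new_parents _
  unfold Spec_new_to_old_py new_to_old_py new_to_old_py_alt
  exact pvGo_eq new_parents (new_parents.length + 1) (-1) []
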